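-- pv_equiv track=rewrite | github.com/ZhipengHe/Shared-and-Specialised-Attention-based-Interpretable-Models | data/processor.py | lengths
-- ===== SOURCE A (Python) =====
-- def lengths(log):
--     """This function returns the maximum trace length (trc_len),
--     and the number of cases for train and test sets (cases).
--     The maximum out of trc_len for train and test sets will be
--     used to define the trace length of the dataset that is fed to lstm.
--
--     Args:
--         log ([type]): [description]
--
--     Returns:
--         trc_len: maximum trace length
--         cases: number of cases for train and test sets
--     """
--     trc_len = 1
--     cases = 1
--
--     for i,_ in enumerate(log):
--
--         if trc_len <len(log[i]['ac_order']):
--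
--             trc_len = len(log[i]['ac_order'])
--             cases += 1
--         else:
--             cases += 1
--
--     return trc_len, cases
-- ===== SOURCE B (Python) =====
-- def lengths(log):
--     def mx(lo, hi):
--         # max of len(log[i]['ac_order']) over i in [lo, hi), by divide and conquer
--         if hi <= lo:
--             return 0
--         if hi == lo + 1:
--             return len(log[lo]['ac_order'])
--         mid = (lo + hi) // 2
--         return max(mx(lo, mid), mx(mid, hi))
--     return (max(1, mx(0, len(log))), len(log) + 1)
-- ===== Notes on version B (the rewrite author's own statement) =====
-- stated objective: alternative
-- what changed: Replaces A's single stateful pass (running max plus a counter bumped in both branches) with a divide-and-conquer recursion computing the maximum ac_order length over index halves, seeded with max(...,1), and a closed form len(log)+1 for the case count.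
import Mathlib
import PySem

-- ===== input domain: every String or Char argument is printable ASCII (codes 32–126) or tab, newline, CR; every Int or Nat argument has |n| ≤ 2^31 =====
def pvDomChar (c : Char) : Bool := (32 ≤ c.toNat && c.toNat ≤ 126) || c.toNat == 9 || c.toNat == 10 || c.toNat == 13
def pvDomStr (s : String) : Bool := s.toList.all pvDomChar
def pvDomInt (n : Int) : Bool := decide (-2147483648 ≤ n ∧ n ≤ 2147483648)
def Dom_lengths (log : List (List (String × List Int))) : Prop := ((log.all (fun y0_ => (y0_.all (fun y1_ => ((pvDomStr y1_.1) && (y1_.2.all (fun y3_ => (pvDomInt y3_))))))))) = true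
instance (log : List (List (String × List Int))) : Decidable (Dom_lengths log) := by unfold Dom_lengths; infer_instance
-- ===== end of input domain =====

-- B replaces A's stateful loop with a divide-and-conquer maximum over index halves and a closed-form case count len(log)+1.

-- ===== PORT A =====
-- A's loop body: 'if trc_len < len(log[i]['ac_order']): trc_len = ...; cases += 1 else: cases += 1'
def lengthsStep (log : List (List (String × List Int))) (st : Int × Int)
    (p : Int × List (String × List Int)) : Int × Int :=
  let d := (PySem.List.pyGet? log p.1).getD []            -- log[i] (index always in range here)
  let ac := ((PySem.Dict.mk d).get? "ac_order").getD []   -- d['ac_order']; KeyError excluded by Pre_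
  if st.1 < (ac.length : Int) then ((ac.length : Int), st.2 + 1) else (st.1, st.2 + 1)

def lengths (log : List (List (String × List Int))) : Int × Int :=
  (PySem.List.enumerate log 0).foldl (lengthsStep log) (1, 1)

-- ===== PORT B =====
-- B's helper mx(lo, hi): max of len(log[i]['ac_order']) over i in [lo, hi), divide and conquer.
-- lo, hi are Nat (Python recurses only on nonnegative indices), so Python's '//' = Nat '/' here (exact).
def lengthsMx (log : List (List (String × List Int))) (lo hi : Nat) : Int :=
  if hi ≤ lo then 0
  else if hi = lo + 1 then
    (((((PySem.List.pyGet? log (lo : Int)).getD []) |> PySem.Dict.mk).get? "ac_order").getD []).length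
  else
    let mid := (lo + hi) / 2
    max (lengthsMx log lo mid) (lengthsMx log mid hi)
termination_by hi - lo
decreasing_by all_goals omega

def lengths_alt (log : List (List (String × List Int))) : Int × Int :=
  (max 1 (lengthsMx log 0 log.length), (log.length : Int) + 1)

-- ===== PRECONDITION & SPEC =====
-- Pre_: every case carries the key 'ac_order' (otherwise Python A raises KeyError).
def Pre_lengths (log : List (List (String × List Int))) : Prop :=
  ∀ c ∈ log, ((PySem.Dict.mk c).get? "ac_order").isSome = true
instance (log : List (List (String × List Int))) : Decidable (Pre_lengths log) := by
  unfold Pre_lengths; infer_instance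

def pvWitness_lengths : (List (List (String × List Int))) := [[("ac_order", [1, 2])], [("ac_order", [3])]]

def Spec_lengths (log : List (List (String × List Int))) (out : Int × Int) : Prop := out = lengths_alt log
instance (log : List (List (String × List Int))) (out : Int × Int) : Decidable (Spec_lengths log out) := by unfold Spec_lengths; infer_instance

-- ===== CLAIM (what is proved, stated in full; the proofs are below) =====
def Claim_equal_lengths : Prop := ∀ (log : List (List (String × List Int))), Dom_lengths log → Pre_lengths log → Spec_lengths log (lengths log)

-- ===== LEMMAS AND PROOFS =====

-- len(c['ac_order']) as an Int (the getD default is unreachable under Pre_, and harmless to the equality)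
def acLen (c : List (String × List Int)) : Int :=
  ((((PySem.Dict.mk c).get? "ac_order").getD []).length : Int)

lemma acLen_nonneg (c : List (String × List Int)) : 0 ≤ acLen c := by
  unfold acLen; positivity

-- A's step, rewritten on the enumerated element itself, with the if folded into max
lemma lengthsStep_eq_elem (log : List (List (String × List Int)))
    (st : Int × Int) (p : Int × List (String × List Int)) (hp : p ∈ PySem.List.enumerate log 0) :
    lengthsStep log st p = (max st.1 (acLen p.2), st.2 + 1) := by
  rcases (PySem.List.mem_enumerate_iff log 0 p).1 hp with ⟨k, hk, rfl⟩
  simp only [lengthsStep, acLen, zero_add]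
  rw [PySem.List.pyGet?_natCast]
  simp only [List.getElem?_eq_getElem hk, Option.getD_some]
  have hmax : max st.1 (((((PySem.Dict.mk log[k]).get? "ac_order").getD []).length : Nat) : Int)
      = if st.1 < (((((PySem.Dict.mk log[k]).get? "ac_order").getD []).length : Nat) : Int)
        then (((((PySem.Dict.mk log[k]).get? "ac_order").getD []).length : Nat) : Int) else st.1 := by
    omega
  rw [hmax]
  split <;> rfl

-- a fold over enumerate whose body reads only the element equals the fold over the list
lemma foldl_enumerate_snd {α β : Type} (g : β → α → β) :
    ∀ (xs : List α) (s : Int) (st : β),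
      (PySem.List.enumerate xs s).foldl (fun acc p => g acc p.2) st = xs.foldl g st := by
  intro xs
  induction xs with
  | nil => intro s st; simp [PySem.List.enumerate_nil]
  | cons x xs ih => intro s st; rw [PySem.List.enumerate_cons]; simp only [List.foldl_cons, ih]

-- the element-wise fold computes (running max of the lengths, count + list length)
lemma foldl_elem_lengths :
    ∀ (xs : List (List (String × List Int))) (t c : Int),
      xs.foldl (fun st x => (max st.1 (acLen x), st.2 + 1)) (t, c)
        = ((xs.map acLen).foldl max t, c + xs.length) := by
  intro xs
  induction xs with
  | nil => intro t c; simp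
  | cons x xs ih =>
      intro t c
      simp only [List.foldl_cons, List.map_cons, List.length_cons, ih]
      refine Prod.ext rfl ?_
      push_cast
      ring

-- the seed is a lower bound of a left fold of max
lemma le_foldl_max : ∀ (xs : List Int) (a : Int), a ≤ xs.foldl max a := by
  intro xs
  induction xs with
  | nil => intro a; exact le_refl a
  | cons x xs ih => intro a; exact le_trans (le_max_left a x) (ih _)

-- max distributes out of a left fold of max
lemma foldl_max_max : ∀ (xs : List Int) (a b : Int),
    xs.foldl max (max a b) = max a (xs.foldl max b) := by
  intro xs
  induction xs with
  | nil => intro a b; rfl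
  | cons x xs ih =>
      intro a b
      simp only [List.foldl_cons]
      rw [max_assoc, ih]

-- B's divide-and-conquer equals the fold of max over the corresponding window of lengths
lemma lengthsMx_eq_foldl (log : List (List (String × List Int))) :
    ∀ (n lo : Nat), lo + n ≤ log.length →
      lengthsMx log lo (lo + n) = (((log.drop lo).take n).map acLen).foldl max 0 := by
  intro n
  induction n using Nat.strong_induction_on with
  | _ n ih =>
    intro lo hle
    rcases Nat.eq_zero_or_pos n with h0 | hpos
    · subst h0
      rw [lengthsMx]
      simp
    rcases Nat.lt_or_ge 1 n with h1 | h1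
    · -- n ≥ 2: recursive case
      rw [lengthsMx]
      have hne : ¬ lo + n ≤ lo := by omega
      have hne1 : ¬ lo + n = lo + 1 := by omega
      rw [if_neg hne, if_neg hne1]
      set mid := (lo + (lo + n)) / 2 with hmid
      have hlo : lo < mid := by omega
      have hhi : mid < lo + n := by omega
      set k := mid - lo with hk
      have hmid' : mid = lo + k := by omega
      have hrest : lo + n = mid + (n - k) := by omega
      have h1' : lengthsMx log lo mid = (((log.drop lo).take k).map acLen).foldl max 0 := by
        rw [hmid']; exact ih k (by omega) lo (by omega)
      have h2' : lengthsMx log mid (lo + n)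
          = (((log.drop mid).take (n - k)).map acLen).foldl max 0 := by
        rw [hrest]; exact ih (n - k) (by omega) mid (by omega)
      show max (lengthsMx log lo mid) (lengthsMx log mid (lo + n)) = _
      rw [h1', h2']
      have hsplit : (log.drop lo).take n
          = (log.drop lo).take k ++ ((log.drop lo).drop k).take (n - k) := by
        have : n = k + (n - k) := by omega
        rw [this, List.take_add]
        congr 2
        omega
      rw [hsplit, List.drop_drop, ← hmid']
      rw [List.map_append, List.foldl_append]
      have hnn : (((log.drop lo).take k).map acLen).foldl max 0
          = max ((((log.drop lo).take k).map acLen).foldl max 0) 0 :=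
        (max_eq_left (le_foldl_max _ 0)).symm
      rw [hnn, foldl_max_max, max_assoc, max_eq_right (le_foldl_max _ 0)]
    · -- n = 1: base case
      have : n = 1 := by omega
      subst this
      rw [lengthsMx]
      have hne : ¬ lo + 1 ≤ lo := by omega
      rw [if_neg hne, if_pos rfl]
      have hlt : lo < log.length := by omega
      rw [PySem.List.pyGet?_natCast]
      have hget : (log.drop lo).take 1 = [log[lo]] := by
        rw [List.take_one_drop_eq_of_lt_length hlt]; simp [List.get_eq_getElem]
      rw [hget]
      simp only [List.getElem?_eq_getElem hlt, Option.getD_some, List.map_cons, List.map_nil,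
        List.foldl_cons, List.foldl_nil]
      have := acLen_nonneg log[lo]
      unfold acLen at this ⊢
      omega

-- ===== VERDICT (by name: the statement is the Claim_ definition above) =====
theorem lengths_spec : Claim_equal_lengths := by
  intro log _ _
  unfold Spec_lengths
  unfold lengths lengths_alt
  have h1 : (PySem.List.enumerate log 0).foldl (lengthsStep log) (1, 1)
      = (PySem.List.enumerate log 0).foldl (fun st p => (max st.1 (acLen p.2), st.2 + 1)) (1, 1) :=
    PySem.List.foldl_congr_mem (PySem.List.enumerate log 0) (lengthsStep log) _ (1, 1)
      (fun acc p hp => lengthsStep_eq_elem log acc p hp)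
  rw [h1, foldl_enumerate_snd (fun st x => (max st.1 (acLen x), st.2 + 1)), foldl_elem_lengths]
  have hmx : lengthsMx log 0 log.length = ((log.map acLen).foldl max 0) := by
    have := lengthsMx_eq_foldl log log.length 0 (by omega)
    simpa using this
  rw [hmx]
  have : (log.map acLen).foldl max 1 = max 1 ((log.map acLen).foldl max 0) := by
    have h := foldl_max_max (log.map acLen) 1 0
    simpa using h
  rw [this]
  refine Prod.ext rfl ?_
  simp
  ring
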